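-- pv_equiv track=rewrite | github.com/mozman/ezdxf | ezdxf/tools/__init__.py | raise_decimals
-- ===== SOURCE A (Python) =====
-- lifter = {
--     '0': '\u2070',
--     '1': '\u00B9',
--     '2': '²',
--     '3': '³',
--     '4': '\u2074',
--     '5': '\u2075',
--     '6': '\u2076',
--     '7': '\u2077',
--     '8': '\u2078',
--     '9': '\u2079',
-- }
--
-- def raise_decimals(s: str):
--     def _raise():
--         translate = False
--         for char in s:
--             if translate:
--                 if char not in '0123456789':
--                     translate = False
--                 else:
--                     char = lifter.get(char, char)
--             if char == '.':
--                 translate = True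
--                 continue
--             yield char
--     return ''.join(_raise())
-- ===== SOURCE B (Python) =====
-- _SUP = {
--     '0': '\u2070', '1': '\u00B9', '2': '\u00B2', '3': '\u00B3', '4': '\u2074',
--     '5': '\u2075', '6': '\u2076', '7': '\u2077', '8': '\u2078', '9': '\u2079',
-- }
--
--
-- def _sup(part):
--     # superscript the leading run of ASCII digits, keep the rest verbatim
--     i = 0
--     while i < len(part) and part[i] in '0123456789':
--         i += 1
--     return ''.join(_SUP[c] for c in part[:i]) + part[i:]
--
--
-- def raise_decimals(s: str):
--     parts = s.split('.')
--     return parts[0] + ''.join(_sup(part) for part in parts[1:])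
-- ===== Notes on version B (the rewrite author's own statement) =====
-- stated objective: idiomatic
-- what changed: Replaced A's character-by-character generator with a translate flag by split('.') followed by superscripting the leading ASCII-digit run of each post-dot part and concatenating.
import Mathlib
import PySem

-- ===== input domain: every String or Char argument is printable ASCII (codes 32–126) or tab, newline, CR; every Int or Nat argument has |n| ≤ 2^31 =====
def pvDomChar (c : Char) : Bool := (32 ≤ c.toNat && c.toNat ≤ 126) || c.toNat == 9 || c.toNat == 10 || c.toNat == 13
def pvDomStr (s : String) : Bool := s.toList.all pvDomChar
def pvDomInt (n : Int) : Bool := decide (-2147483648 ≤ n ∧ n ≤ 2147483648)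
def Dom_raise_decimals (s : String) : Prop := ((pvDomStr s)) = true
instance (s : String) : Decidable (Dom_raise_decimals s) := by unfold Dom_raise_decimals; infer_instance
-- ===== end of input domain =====

-- B replaces A's stateful single-character translate-flag loop by split('.') plus a per-part
-- leading-digit-run superscripting (objective: idiomatic / alternative; same O(n) cost).

-- ===== PORT A =====

-- the module-level dict `lifter`
def lifterD : PySem.Dict Char Char :=
  PySem.Dict.ofList [('0', '⁰'), ('1', '¹'), ('2', '²'), ('3', '³'), ('4', '⁴'),
                     ('5', '⁵'), ('6', '⁶'), ('7', '⁷'), ('8', '⁸'), ('9', '⁹')]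

-- the string literal '0123456789'; `char not in '0123456789'` is single-char substring
-- membership, exactly list membership of the char (exact).
def digitsLit : List Char := ['0', '1', '2', '3', '4', '5', '6', '7', '8', '9']

-- the generator `_raise`: one step per char, carrying the `translate` flag
def aGo (tr : Bool) : List Char → List Char
  | [] => []
  | c :: rest =>
    -- `if translate: if char not in '0123456789': translate = False else: char = lifter.get(char, char)`
    let p : Bool × Char :=
      if tr then
        (if (digitsLit.contains c) = false then (false, c)
         else (tr, lifterD.getD c c))
      else (tr, c)
    -- `if char == '.': translate = True; continue`  else `yield char`
    if p.2 = '.' then aGo true rest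
    else p.2 :: aGo p.1 rest

-- `''.join(_raise())`: joining the yielded characters is exactly String.mk of their list
def raise_decimals (s : String) : String := String.mk (aGo false s.toList)

-- ===== PORT B =====

-- the module-level dict `_SUP` (same table); `_SUP[c]` for a digit c
def supD : PySem.Dict Char Char :=
  PySem.Dict.ofList [('0', '⁰'), ('1', '¹'), ('2', '²'), ('3', '³'), ('4', '⁴'),
                     ('5', '⁵'), ('6', '⁶'), ('7', '⁷'), ('8', '⁸'), ('9', '⁹')]

-- the `while i < len(part) and part[i] in '0123456789': i += 1` loop of `_sup`
def bRun : List Char → Nat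
  | [] => 0
  | c :: rest => if digitsLit.contains c then bRun rest + 1 else 0

-- `_sup(part)`: part[:i] / part[i:] for the nonnegative i computed above are exactly
-- take i / drop i (exact here); `_SUP[c]` is the dict lookup (every sliced char is a key).
def bSup (part : List Char) : List Char :=
  let i := bRun part
  (part.take i).map (fun c => supD.getD c c) ++ part.drop i

-- `parts = s.split('.')`; `parts[0] + ''.join(_sup(part) for part in parts[1:])`
-- (split with a non-empty separator always yields ≥ 1 part, so parts[0] never raises;
--  the [] branch is unreachable)
def raise_decimals_alt (s : String) : String :=
  match PySem.Chars.splitOn s.toList ['.'] with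
  | [] => ""
  | p :: ps => String.mk (p ++ PySem.Chars.join [] (ps.map bSup))

-- ===== PRECONDITION & SPEC =====
def Spec_raise_decimals (s : String) (out : String) : Prop := out = raise_decimals_alt s
instance (s : String) (out : String) : Decidable (Spec_raise_decimals s out) := by unfold Spec_raise_decimals; infer_instance

-- ===== CLAIM (what is proved, stated in full; the proofs are below) =====
def Claim_equal_raise_decimals : Prop := ∀ (s : String), Dom_raise_decimals s → Spec_raise_decimals s (raise_decimals s)

-- ===== LEMMAS AND PROOFS =====

-- splitOn with the one-char separator '.' computes List.splitOnP (· == '.')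
theorem splitOn_go_dot (fuel : Nat) (l cur : List Char) (acc : List (List Char))
    (h : l.length < fuel) :
    PySem.Chars.splitOn.go ['.'] fuel l cur acc
      = acc.reverse ++ (List.splitOnP (· == '.') l).modifyHead (cur.reverse ++ ·) := by
  induction fuel generalizing l cur acc with
  | zero => omega
  | succ n ih =>
    cases l with
    | nil =>
      simp [PySem.Chars.splitOn.go, List.splitOnP_nil]
    | cons c rest =>
      have hr : rest.length < n := by simpa using h
      by_cases hc : c = '.'
      · subst hc
        rw [show PySem.Chars.splitOn.go ['.'] (n+1) ('.' :: rest) cur acc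
              = PySem.Chars.splitOn.go ['.'] n rest [] (cur.reverse :: acc) by
            simp [PySem.Chars.splitOn.go, List.isPrefixOf]]
        rw [ih rest [] (cur.reverse :: acc) hr]
        have hne := List.splitOnP_ne_nil (· == '.') rest
        cases hsp : List.splitOnP (· == '.') rest with
        | nil => exact absurd hsp hne
        | cons p ps =>
          simp [List.splitOnP_cons, hsp, List.modifyHead]
      · rw [show PySem.Chars.splitOn.go ['.'] (n+1) (c :: rest) cur acc
              = PySem.Chars.splitOn.go ['.'] n rest (c :: cur) acc by
            simp [PySem.Chars.splitOn.go, List.isPrefixOf, Ne.symm hc]]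
        rw [ih rest (c :: cur) acc hr]
        have hne := List.splitOnP_ne_nil (· == '.') rest
        cases hsp : List.splitOnP (· == '.') rest with
        | nil => exact absurd hsp hne
        | cons p ps =>
          simp [List.splitOnP_cons, hsp, hc, List.modifyHead]

theorem splitOn_dot (l : List Char) :
    PySem.Chars.splitOn l ['.'] = List.splitOnP (· == '.') l := by
  rw [show PySem.Chars.splitOn l ['.'] = PySem.Chars.splitOn.go ['.'] (l.length + 1) l [] [] from rfl,
      splitOn_go_dot (l.length + 1) l [] [] (by omega)]
  cases hsp : List.splitOnP (· == '.') l with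
  | nil => exact absurd hsp (List.splitOnP_ne_nil _ l)
  | cons p ps => simp [List.modifyHead]

-- ''.join over chars-lists is flatten
theorem join_nil_eq_flatten (parts : List (List Char)) :
    PySem.Chars.join [] parts = parts.flatten := by
  induction parts with
  | nil => simp [PySem.Chars.join, List.intercalate]
  | cons p ps ih =>
    cases ps with
    | nil => simp [PySem.Chars.join, List.intercalate]
    | cons q qs =>
      rw [PySem.Chars.join_cons_cons, ih]
      simp

-- the two lookup tables agree (they are the same literal)
theorem supD_eq_lifterD : supD = lifterD := rfl

-- bSup on a leading digit pulls out one translated char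
theorem bSup_cons_digit (c : Char) (p : List Char) (hc : c ∈ digitsLit) :
    bSup (c :: p) = lifterD.getD c c :: bSup p := by
  simp [bSup, bRun, hc, supD_eq_lifterD]

-- bSup on a leading non-digit is the identity
theorem bSup_cons_nondigit (c : Char) (p : List Char) (hc : c ∉ digitsLit) :
    bSup (c :: p) = c :: p := by
  simp [bSup, bRun, hc]

-- a translated digit is never '.'
theorem lift_digit_ne_dot (c : Char) (hc : c ∈ digitsLit) :
    lifterD.getD c c ≠ '.' := by
  simp only [digitsLit, List.mem_cons, List.not_mem_nil, or_false] at hc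
  rcases hc with rfl | rfl | rfl | rfl | rfl | rfl | rfl | rfl | rfl | rfl <;> decide

-- one-step equations for A's flag machine
theorem aGo_false_dot (r : List Char) : aGo false ('.' :: r) = aGo true r := by
  simp [aGo]

theorem aGo_false_other (c : Char) (r : List Char) (hc : c ≠ '.') :
    aGo false (c :: r) = c :: aGo false r := by
  simp [aGo, hc]

theorem aGo_true_dot (r : List Char) : aGo true ('.' :: r) = aGo true r := by
  simp [aGo, show ('.' : Char) ∉ digitsLit by decide]

theorem aGo_true_digit (c : Char) (r : List Char) (hc : c ∈ digitsLit) :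
    aGo true (c :: r) = lifterD.getD c c :: aGo true r := by
  simp [aGo, hc, lift_digit_ne_dot c hc]

theorem aGo_true_other (c : Char) (r : List Char) (hd : c ∉ digitsLit) (hc : c ≠ '.') :
    aGo true (c :: r) = c :: aGo false r := by
  simp [aGo, hd, hc]

-- the key invariant: A's flag machine, in both flag states, against B's split-based shape
theorem aGo_eq_split (l : List Char) :
    (∀ p ps, List.splitOnP (· == '.') l = p :: ps →
        aGo false l = p ++ (ps.map bSup).flatten)
    ∧ aGo true l = ((List.splitOnP (· == '.') l).map bSup).flatten := by
  induction l with
  | nil =>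
    constructor
    · intro p ps hsp
      simp only [List.splitOnP_nil] at hsp
      cases hsp
      simp [aGo]
    · simp [aGo, List.splitOnP_nil, bSup, bRun]
  | cons c rest ih =>
    obtain ⟨ih0, ih1⟩ := ih
    have hne := List.splitOnP_ne_nil (· == '.') rest
    cases hsp : List.splitOnP (· == '.') rest with
    | nil => exact absurd hsp hne
    | cons q qs =>
      by_cases hc : c = '.'
      · subst hc
        have hspc : List.splitOnP (· == '.') ('.' :: rest) = [] :: q :: qs := by
          simp [List.splitOnP_cons, hsp]
        constructor
        · intro p ps h
          rw [hspc] at h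
          cases h
          rw [aGo_false_dot, ih1, hsp]
          simp
        · rw [aGo_true_dot, ih1, hsp, hspc]
          simp [show bSup [] = [] from rfl]
      · have hspc : List.splitOnP (· == '.') (c :: rest) = (c :: q) :: qs := by
          simp [List.splitOnP_cons, hc, hsp, List.modifyHead]
        constructor
        · intro p ps h
          rw [hspc] at h
          cases h
          rw [aGo_false_other c rest hc, ih0 q qs hsp]
          simp
        · by_cases hd : c ∈ digitsLit
          · rw [aGo_true_digit c rest hd, ih1, hsp, hspc]
            simp [bSup_cons_digit c q hd]
          · rw [aGo_true_other c rest hd hc, ih0 q qs hsp, hspc]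
            simp [bSup_cons_nondigit c q hd]

-- ===== VERDICT (by name: the statement is the Claim_ definition above) =====
theorem raise_decimals_spec : Claim_equal_raise_decimals := by
  intro s _
  unfold Spec_raise_decimals raise_decimals raise_decimals_alt
  rw [splitOn_dot]
  have hne := List.splitOnP_ne_nil (· == '.') s.toList
  cases hsp : List.splitOnP (· == '.') s.toList with
  | nil => exact absurd hsp hne
  | cons p ps =>
    rw [(aGo_eq_split s.toList).1 p ps hsp]
    simp only [join_nil_eq_flatten]
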